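-- pv_equiv track=rewrite | github.com/contactmukundthiru-cyber/Debt-Re-Aging | app/cfpb_complaint.py | determine_cfpb_issue
-- ===== SOURCE A (Python) =====
-- from typing import Dict, List, Any, Optional
--
-- def determine_cfpb_issue(flags: List[Dict]) -> tuple:
--     """Determine the best CFPB issue category based on flags."""
--
--     # Check for date manipulation (re-aging)
--     date_issues = ['A1', 'A2', 'B1', 'B2', 'K6']
--     has_date_issue = any(f.get('rule_id') in date_issues for f in flags)
--
--     # Check for status issues
--     status_issues = ['D1', 'D2', 'D3', 'E1', 'E2']
--     has_status_issue = any(f.get('rule_id') in status_issues for f in flags)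
--
--     # Check for balance issues
--     balance_issues = ['F1', 'F2', 'F3']
--     has_balance_issue = any(f.get('rule_id') in balance_issues for f in flags)
--
--     if has_date_issue:
--         return ("Incorrect information on your report", "Old information reappears or never goes away")
--     elif has_status_issue:
--         return ("Incorrect information on your report", "Account status incorrect")
--     elif has_balance_issue:
--         return ("Incorrect information on your report", "Account information incorrect")
--     else:
--         return ("Incorrect information on your report", "Account information incorrect")
-- ===== SOURCE B (Python) =====
-- _TIER = {
--     'A1': 0, 'A2': 0, 'B1': 0, 'B2': 0, 'K6': 0,
--     'D1': 1, 'D2': 1, 'D3': 1, 'E1': 1, 'E2': 1,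
-- }
--
-- def determine_cfpb_issue(flags):
--     """Determine the best CFPB issue category based on flags."""
--     best = 2
--     for f in flags:
--         best = min(best, _TIER.get(f.get('rule_id'), 2))
--     if best == 0:
--         return ("Incorrect information on your report", "Old information reappears or never goes away")
--     if best == 1:
--         return ("Incorrect information on your report", "Account status incorrect")
--     return ("Incorrect information on your report", "Account information incorrect")
-- ===== Notes on version B (the rewrite author's own statement) =====
-- stated objective: simpler
-- what changed: Replaces three separate any-scans over the flag list by one pass that keeps the minimum priority tier looked up in a rule_id->tier table, and drops the inert balance branch (it returns the same tuple as the default).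
import Mathlib
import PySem

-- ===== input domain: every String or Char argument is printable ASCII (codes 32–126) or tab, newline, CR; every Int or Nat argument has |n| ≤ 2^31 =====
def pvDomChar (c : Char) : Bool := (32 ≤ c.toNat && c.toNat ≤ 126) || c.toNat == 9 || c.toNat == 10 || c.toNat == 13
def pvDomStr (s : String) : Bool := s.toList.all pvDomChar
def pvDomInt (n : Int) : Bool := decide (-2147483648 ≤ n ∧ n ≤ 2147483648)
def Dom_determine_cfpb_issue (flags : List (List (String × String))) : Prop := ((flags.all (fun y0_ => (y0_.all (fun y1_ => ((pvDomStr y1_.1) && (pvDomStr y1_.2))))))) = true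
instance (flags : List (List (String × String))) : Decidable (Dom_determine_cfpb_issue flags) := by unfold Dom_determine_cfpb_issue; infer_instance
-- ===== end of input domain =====

-- B replaces A's three any-scans by one pass keeping the minimum priority tier from a
-- rule_id → tier table, dropping the inert balance branch (objective: simpler).

-- shared helper: Python's f.get('rule_id') on a dict (assoc list, first match)
def pvGetRule (f : List (String × String)) : Option String :=
  (PySem.Dict.mk f).get? "rule_id"

-- ===== PORT A =====
def determine_cfpb_issue (flags : List (List (String × String))) : String × String :=
  let date_issues : List String := ["A1", "A2", "B1", "B2", "K6"]
  let has_date_issue := flags.any (fun f =>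
    match pvGetRule f with | some r => date_issues.contains r | none => false)
  let status_issues : List String := ["D1", "D2", "D3", "E1", "E2"]
  let has_status_issue := flags.any (fun f =>
    match pvGetRule f with | some r => status_issues.contains r | none => false)
  let balance_issues : List String := ["F1", "F2", "F3"]
  let has_balance_issue := flags.any (fun f =>
    match pvGetRule f with | some r => balance_issues.contains r | none => false)
  if has_date_issue then
    ("Incorrect information on your report", "Old information reappears or never goes away")
  else if has_status_issue then
    ("Incorrect information on your report", "Account status incorrect")
  else if has_balance_issue then
    ("Incorrect information on your report", "Account information incorrect")
  else
    ("Incorrect information on your report", "Account information incorrect")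

-- ===== PORT B =====
def pvTier : PySem.Dict String Int :=
  PySem.Dict.mk [("A1", 0), ("A2", 0), ("B1", 0), ("B2", 0), ("K6", 0),
                 ("D1", 1), ("D2", 1), ("D3", 1), ("E1", 1), ("E2", 1)]

def determine_cfpb_issue_alt (flags : List (List (String × String))) : String × String :=
  let best := flags.foldl (fun b f =>
    min b (match pvGetRule f with | some r => pvTier.getD r 2 | none => 2)) 2
  if best = 0 then
    ("Incorrect information on your report", "Old information reappears or never goes away")
  else if best = 1 then
    ("Incorrect information on your report", "Account status incorrect")
  else
    ("Incorrect information on your report", "Account information incorrect")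

-- ===== PRECONDITION & SPEC =====
def Spec_determine_cfpb_issue (flags : List (List (String × String))) (out : String × String) : Prop := out = determine_cfpb_issue_alt flags
instance (flags : List (List (String × String))) (out : String × String) : Decidable (Spec_determine_cfpb_issue flags out) := by unfold Spec_determine_cfpb_issue; infer_instance

-- ===== CLAIM (what is proved, stated in full; the proofs are below) =====
def Claim_equal_determine_cfpb_issue : Prop := ∀ (flags : List (List (String × String))), Dom_determine_cfpb_issue flags → Spec_determine_cfpb_issue flags (determine_cfpb_issue flags)

-- ===== LEMMAS AND PROOFS =====

-- tier value B computes for one flag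
def pvTierVal (f : List (String × String)) : Int :=
  match pvGetRule f with | some r => pvTier.getD r 2 | none => 2

def pvIsDate (f : List (String × String)) : Bool :=
  match pvGetRule f with | some r => ["A1", "A2", "B1", "B2", "K6"].contains r | none => false

def pvIsStatus (f : List (String × String)) : Bool :=
  match pvGetRule f with | some r => ["D1", "D2", "D3", "E1", "E2"].contains r | none => false

lemma pvTierVal_eq (f : List (String × String)) :
    pvTierVal f = if pvIsDate f then 0 else if pvIsStatus f then 1 else 2 := by
  unfold pvTierVal pvIsDate pvIsStatus
  cases h : pvGetRule f with
  | none => simp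
  | some r =>
    simp only [pvTier, PySem.Dict.getD_eq_get?_getD, PySem.Dict.get?_mk_cons]
    split_ifs <;> simp_all [PySem.Dict.get?, beq_iff_eq] <;> simp_all [eq_comm]

-- rank of the whole list as A sees it
def pvRank (flags : List (List (String × String))) : Int :=
  if flags.any pvIsDate then 0 else if flags.any pvIsStatus then 1 else 2

lemma foldl_min_eq_rank (flags : List (List (String × String))) (b : Int) (hb : b ≤ 2) :
    flags.foldl (fun b f => min b (pvTierVal f)) b = min b (pvRank flags) := by
  induction flags generalizing b with
  | nil => simp [pvRank]; omega
  | cons f fs ih =>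
    simp only [List.foldl_cons]
    rw [ih (min b (pvTierVal f)) (by rw [pvTierVal_eq]; split_ifs <;> omega)]
    rw [pvTierVal_eq]
    unfold pvRank
    simp only [List.any_cons]
    by_cases hd : pvIsDate f <;> by_cases hs : pvIsStatus f <;>
      by_cases hd' : fs.any pvIsDate <;> by_cases hs' : fs.any pvIsStatus <;>
      simp [hd, hs, hd', hs']

-- ===== VERDICT (by name: the statement is the Claim_ definition above) =====
theorem determine_cfpb_issue_spec : Claim_equal_determine_cfpb_issue := by
  intro flags _
  show determine_cfpb_issue flags = determine_cfpb_issue_alt flags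
  unfold determine_cfpb_issue determine_cfpb_issue_alt
  simp only
  rw [show (fun (b : Int) f => min b (match pvGetRule f with | some r => pvTier.getD r 2 | none => 2)) = (fun b f => min b (pvTierVal f)) from rfl]
  rw [foldl_min_eq_rank flags 2 (by omega)]
  rw [show (fun f => match pvGetRule f with | some r => (["A1", "A2", "B1", "B2", "K6"] : List String).contains r | none => false) = pvIsDate from rfl]
  rw [show (fun f => match pvGetRule f with | some r => (["D1", "D2", "D3", "E1", "E2"] : List String).contains r | none => false) = pvIsStatus from rfl]
  unfold pvRank
  by_cases hd : flags.any pvIsDate <;> by_cases hs : flags.any pvIsStatus <;>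
    simp [hd, hs]
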